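-- pv_equiv track=rewrite | github.com/Pranov123/Crptyo_CIA_UPS | august.py | interleave_hash
-- ===== SOURCE A (Python) =====
-- def interleave_hash(text, hash_val, key):
--     r = (len(key) % 3) + 2
--
--     result = ""
--     j = 0
--
--     for i in range(len(text)):
--         result += text[i]
--
--         if (i + 1) % r == 0 and j < len(hash_val):
--             result += hash_val[j]
--             j += 1
--
--     return result
-- ===== SOURCE B (Python) =====
-- def interleave_hash(text, hash_val, key):
--     r = (len(key) % 3) + 2
--     nb = len(text) // r
--     parts = []
--     for c in range(nb):
--         parts.append(text[c * r:(c + 1) * r])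
--         if c < len(hash_val):
--             parts.append(hash_val[c])
--     parts.append(text[nb * r:])
--     return ''.join(parts)
-- ===== Notes on version B (the rewrite author's own statement) =====
-- stated objective: alternative
-- what changed: B iterates over block boundaries, slicing text into r-sized chunks interleaved with hash chars and joining a parts list once, instead of stepping character-by-character with a modulo counter and repeated string concatenation.
import Mathlib
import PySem

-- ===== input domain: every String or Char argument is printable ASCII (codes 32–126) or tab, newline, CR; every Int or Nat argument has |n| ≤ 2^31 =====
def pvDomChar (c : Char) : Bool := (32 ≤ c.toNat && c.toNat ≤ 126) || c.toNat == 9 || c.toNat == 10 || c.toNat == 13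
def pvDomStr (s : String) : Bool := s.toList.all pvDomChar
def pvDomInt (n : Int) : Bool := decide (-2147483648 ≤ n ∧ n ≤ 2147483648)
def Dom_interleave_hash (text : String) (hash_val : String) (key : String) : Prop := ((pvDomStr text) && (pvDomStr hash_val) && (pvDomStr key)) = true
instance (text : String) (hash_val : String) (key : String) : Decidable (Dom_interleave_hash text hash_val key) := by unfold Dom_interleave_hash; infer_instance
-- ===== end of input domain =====

-- B replaces A's per-character loop (modulo counter, repeated string +=) by iterating over
-- block boundaries: slice r-sized chunks of text, interleave hash chars, join a parts list once.

-- ===== PORT A =====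
-- one loop iteration of A: append text[i], then on an r-boundary append the next hash char
def astep (t h : List Char) (r : Int) (st : List Char × Int) (i : Int) : List Char × Int :=
  let res := st.1 ++ [PySem.List.pyGetD t i ' ']
  if PySem.Int.mod (i + 1) r = 0 ∧ st.2 < PySem.Chars.len h then
    (res ++ [PySem.List.pyGetD h st.2 ' '], st.2 + 1)
  else
    (res, st.2)

def interleave_hash (text : String) (hash_val : String) (key : String) : String :=
  let r : Int := PySem.Int.mod (PySem.Str.len key) 3 + 2
  let st := (PySem.List.pyRange 0 (PySem.Str.len text) 1).foldl
      (astep text.toList hash_val.toList r) ([], 0)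
  String.ofList st.1

-- ===== PORT B =====
-- one loop iteration of B: append the c-th r-block of text, then hash_val[c] if available
def bstep (t h : List Char) (r : Int) (acc : List (List Char)) (c : Int) : List (List Char) :=
  let acc := acc ++ [PySem.List.slice t (some (c * r)) (some ((c + 1) * r))]
  if c < PySem.Chars.len h then acc ++ [[PySem.List.pyGetD h c ' ']] else acc

def interleave_hash_alt (text : String) (hash_val : String) (key : String) : String :=
  let r : Int := PySem.Int.mod (PySem.Str.len key) 3 + 2
  let nb : Int := PySem.Int.floordiv (PySem.Str.len text) r
  let parts := (PySem.List.pyRange 0 nb 1).foldl (bstep text.toList hash_val.toList r) []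
  String.ofList (PySem.Chars.join [] (parts ++ [PySem.List.slice text.toList (some (nb * r)) none]))

-- ===== PRECONDITION & SPEC =====
def Spec_interleave_hash (text : String) (hash_val : String) (key : String) (out : String) : Prop := out = interleave_hash_alt text hash_val key
instance (text : String) (hash_val : String) (key : String) (out : String) : Decidable (Spec_interleave_hash text hash_val key out) := by unfold Spec_interleave_hash; infer_instance

-- ===== CLAIM (what is proved, stated in full; the proofs are below) =====
def Claim_equal_interleave_hash : Prop := ∀ (text : String) (hash_val : String) (key : String), Dom_interleave_hash text hash_val key → Spec_interleave_hash text hash_val key (interleave_hash text hash_val key)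

-- ===== LEMMAS AND PROOFS =====

-- the common shape: k more full r-blocks starting at block index c, then the tail of t
def bsuf (t h : List Char) (r : Nat) : Nat → Nat → List Char
  | c, 0 => t.drop (c * r)
  | c, k + 1 =>
      (t.drop (c * r)).take r ++ (if hc : c < h.length then [h[c]] else []) ++ bsuf t h r (c + 1) k

lemma join_nil_eq_flatten (xs : List (List Char)) : PySem.Chars.join [] xs = xs.flatten := by
  induction xs with
  | nil => rfl
  | cons x t ih =>
      cases t with
      | nil => simp [PySem.Chars.join, List.intercalate]
      | cons y t' =>
          rw [PySem.Chars.join_cons_cons] at *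
          simp_all

-- A's loop over a trigger-free index segment just copies text characters
lemma noTrig (t h : List Char) (rn : Nat) :
    ∀ (m a : Nat) (acc : List Char) (j : Int),
      (∀ i : Nat, a ≤ i → i < a + m → (i + 1) % rn ≠ 0) →
      a + m ≤ t.length →
      (PySem.List.pyRange (a : Int) ((a + m : Nat) : Int) 1).foldl (astep t h (rn : Int)) (acc, j)
        = (acc ++ (t.drop a).take m, j) := by
  intro m
  induction m with
  | zero =>
      intro a acc j _ _
      rw [PySem.List.pyRange_one_eq_nil (by omega)]
      simp
  | succ m ih =>
      intro a acc j hno hlen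
      rw [PySem.List.pyRange_one_cons (by exact_mod_cast Nat.lt_add_of_pos_right (Nat.succ_pos m))]
      have hstep : astep t h (rn : Int) (acc, j) (a : Int) = (acc ++ [t.getD a ' '], j) := by
        unfold astep
        have : PySem.Int.mod ((a : Int) + 1) (rn : Int) = (((a + 1) % rn : Nat) : Int) := by
          exact_mod_cast PySem.Int.mod_natCast (a + 1) rn
        rw [if_neg]
        · simp [PySem.List.pyGetD_natCast]
        · intro hcon
          exact hno a (le_refl a) (by omega) (by exact_mod_cast this ▸ hcon.1)
      rw [List.foldl_cons, hstep]
      have hcast : ((a + (m + 1) : Nat) : Int) = (((a + 1) + m : Nat) : Int) := by push_cast; ring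
      have : ((a : Int) + 1) = (((a + 1 : Nat)) : Int) := by push_cast; ring
      rw [this, hcast, ih (a + 1) (acc ++ [t.getD a ' ']) j (by intro i h1 h2; exact hno i (by omega) (by omega)) (by omega)]
      have ha : a < t.length := by omega
      have htake : (t.drop a).take (m + 1) = t[a] :: (t.drop (a + 1)).take m := by
        rw [List.drop_eq_getElem_cons ha, List.take_succ_cons]
      simp [htake, List.getD_eq_getElem?_getD, List.getElem?_eq_getElem ha]

-- A's loop from block boundary c (with j = min c |h|) produces bsuf
lemma aLoop (t h : List Char) (rn : Nat) (hr : 0 < rn) :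
    ∀ (k c : Nat) (acc : List Char),
      c + k = t.length / rn →
      ((PySem.List.pyRange ((c * rn : Nat) : Int) ((t.length : Nat) : Int) 1).foldl
          (astep t h (rn : Int)) (acc, ((min c h.length : Nat) : Int))).1
        = acc ++ bsuf t h rn c k := by
  intro k
  induction k with
  | zero =>
      intro c acc hc
      have hc' : c = t.length / rn := by omega
      have hle : c * rn ≤ t.length := by
        rw [hc']; exact Nat.div_mul_le_self _ _
      rw [show ((t.length : Nat) : Int) = ((c * rn + (t.length - c * rn) : Nat) : Int) by omega]
      rw [noTrig t h rn (t.length - c * rn) (c * rn) acc _ ?_ (by omega)]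
      · simp [bsuf, List.take_of_length_le, List.length_drop]
      · intro i h1 h2 hmod
        have hdvd : rn ∣ (i + 1) := Nat.dvd_of_mod_eq_zero hmod
        obtain ⟨q, hq⟩ := hdvd
        have hsm : (c + 1) * rn = c * rn + rn := Nat.succ_mul c rn
        have e1 : t.length / rn * rn + t.length % rn = t.length := Nat.div_add_mod' _ _
        have e2 : t.length % rn < rn := Nat.mod_lt _ hr
        have e3 : t.length / rn * rn = c * rn := by rw [hc']
        have hq' : i + 1 = q * rn := by rw [hq, Nat.mul_comm]
        have ec : c < q := Nat.lt_of_mul_lt_mul_right (by omega : c * rn < q * rn)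
        have ed : q < c + 1 := Nat.lt_of_mul_lt_mul_right (by omega : q * rn < (c + 1) * rn)
        omega
  | succ k ih =>
      intro c acc hc
      have hnb : c < t.length / rn := by omega
      have hsm : (c + 1) * rn = c * rn + rn := Nat.succ_mul c rn
      have hblk : (c + 1) * rn ≤ t.length := by
        have h1 := Nat.mul_le_mul_right rn (by omega : c + 1 ≤ t.length / rn)
        have h2 := Nat.div_mul_le_self t.length rn
        omega
      -- split off the first block [c*rn, (c+1)*rn)
      rw [PySem.List.pyRange_one_append ((c * rn : Nat) : Int) (((c + 1) * rn : Nat) : Int) _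
          (by exact_mod_cast (by omega : c * rn ≤ (c + 1) * rn)) (by exact_mod_cast hblk),
        List.foldl_append]
      -- within the block: trigger-free prefix of length rn - 1, then the boundary index
      have hsplit : (((c + 1) * rn : Nat) : Int) = ((c * rn + (rn - 1) : Nat) : Int) + 1 := by
        rw [hsm]; push_cast; omega
      rw [hsplit,
        PySem.List.pyRange_one_succ_right (by exact_mod_cast Nat.le_add_right _ _),
        List.foldl_append,
        noTrig t h rn (rn - 1) (c * rn) acc _ ?_ (by omega)]
      · -- the boundary step at index c*rn + (rn-1)
        have hidx : c * rn + (rn - 1) < t.length := by omega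
        have hboundary : PySem.Int.mod (((c * rn + (rn - 1) : Nat) : Int) + 1) (rn : Int) = 0 := by
          rw [← hsplit, PySem.Int.mod_natCast]
          simp [Nat.mul_mod_left]
        simp only [List.foldl_cons, List.foldl_nil]
        have g1 : PySem.List.pyGetD t ((c * rn + (rn - 1) : Nat) : Int) ' '
            = t.getD (c * rn + (rn - 1)) ' ' := PySem.List.pyGetD_natCast _ _ _
        have hsome : (t.drop (c * rn))[rn - 1]? = some t[c * rn + (rn - 1)] := by
          rw [List.getElem?_drop]
          exact List.getElem?_eq_getElem hidx
        have hGet : t.getD (c * rn + (rn - 1)) ' ' = t[c * rn + (rn - 1)] := by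
          simp [List.getD_eq_getElem?_getD, List.getElem?_eq_getElem hidx]
        have h1 : (t.drop (c * rn)).take (rn - 1) ++ [t.getD (c * rn + (rn - 1)) ' ']
            = (t.drop (c * rn)).take rn := by
          have ht1 : (t.drop (c * rn)).take (rn - 1 + 1)
              = (t.drop (c * rn)).take (rn - 1) ++ ((t.drop (c * rn))[rn - 1]?).toList := by
            rw [List.take_add_one]
          rw [show rn - 1 + 1 = rn by omega, hsome] at ht1
          simp [ht1, List.getElem?_eq_getElem hidx]
        by_cases hch : c < h.length
        · have hmin : min c h.length = c := Nat.min_eq_left (le_of_lt hch)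
          have hmin2 : min (c + 1) h.length = c + 1 := Nat.min_eq_left hch
          have hclt : ((min c h.length : Nat) : Int) < PySem.Chars.len h := by
            rw [hmin]; simp only [PySem.Chars.len]; exact_mod_cast hch
          have g2 : PySem.List.pyGetD h ((min c h.length : Nat) : Int) ' '
              = h.getD (min c h.length) ' ' := PySem.List.pyGetD_natCast _ _ _
          have hja : astep t h (rn : Int)
              (acc ++ (t.drop (c * rn)).take (rn - 1), ((min c h.length : Nat) : Int))
              ((c * rn + (rn - 1) : Nat) : Int)
              = (acc ++ (t.drop (c * rn)).take (rn - 1) ++ [t.getD (c * rn + (rn - 1)) ' '] ++ [h.getD c ' '],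
                 ((min (c + 1) h.length : Nat) : Int)) := by
            simp only [astep]
            rw [if_pos ⟨hboundary, hclt⟩, g1, g2, hmin, hmin2]
            norm_cast
          rw [hja, ← hsplit, ih (c + 1) _ (by omega)]
          simp only [bsuf, dif_pos hch]
          have h2 : h.getD c ' ' = h[c] := by
            simp [List.getD_eq_getElem?_getD, List.getElem?_eq_getElem hch]
          simp [← h1, List.getElem?_eq_getElem hch]
        · have hmin : min c h.length = h.length := Nat.min_eq_right (by omega)
          have hmin2 : min (c + 1) h.length = h.length := Nat.min_eq_right (by omega)
          have hja : astep t h (rn : Int)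
              (acc ++ (t.drop (c * rn)).take (rn - 1), ((min c h.length : Nat) : Int))
              ((c * rn + (rn - 1) : Nat) : Int)
              = (acc ++ (t.drop (c * rn)).take (rn - 1) ++ [t.getD (c * rn + (rn - 1)) ' '],
                 ((min (c + 1) h.length : Nat) : Int)) := by
            simp only [astep]
            rw [if_neg, g1, hmin, hmin2]
            rintro ⟨-, hlt⟩
            rw [hmin] at hlt
            simp only [PySem.Chars.len] at hlt
            omega
          rw [hja, ← hsplit, ih (c + 1) _ (by omega)]
          simp only [bsuf, dif_neg hch]
          simp [← h1]
      · -- no trigger strictly inside the block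
        intro i h1 h2 hmod
        have hdvd : rn ∣ (i + 1) := Nat.dvd_of_mod_eq_zero hmod
        obtain ⟨q, hq⟩ := hdvd
        have hq' : i + 1 = q * rn := by rw [hq, Nat.mul_comm]
        have ec : c < q := Nat.lt_of_mul_lt_mul_right (by omega : c * rn < q * rn)
        have ed : q < c + 1 := Nat.lt_of_mul_lt_mul_right (by omega : q * rn < (c + 1) * rn)
        omega

-- B's loop from block index c produces bsuf after the join
lemma bLoop (t h : List Char) (rn : Nat) :
    ∀ (k c : Nat) (acc : List (List Char)),
      c + k = t.length / rn →
      PySem.Chars.join []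
          (((PySem.List.pyRange ((c : Nat) : Int) ((t.length / rn : Nat) : Int) 1).foldl
              (bstep t h (rn : Int)) acc)
            ++ [PySem.List.slice t (some (((t.length / rn : Nat) : Int) * (rn : Int))) none])
        = PySem.Chars.join [] acc ++ bsuf t h rn c k := by
  intro k
  induction k with
  | zero =>
      intro c acc hc
      rw [PySem.List.pyRange_one_eq_nil (by omega), List.foldl_nil]
      rw [show ((( t.length / rn : Nat) : Int) * (rn : Int)) = (((t.length / rn) * rn : Nat) : Int) by push_cast; ring,
        PySem.List.slice_from_natCast]
      rw [join_nil_eq_flatten, join_nil_eq_flatten]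
      simp [bsuf, hc.symm]
  | succ k ih =>
      intro c acc hc
      rw [PySem.List.pyRange_one_cons (by exact_mod_cast (by omega : c < t.length / rn)), List.foldl_cons]
      have hb : bstep t h (rn : Int) acc (c : Int)
          = acc ++ [(t.drop (c * rn)).take rn] ++ (if hch : c < h.length then [[h[c]]] else []) := by
        unfold bstep
        have hs : PySem.List.slice t (some ((c : Int) * (rn : Int))) (some (((c : Int) + 1) * (rn : Int)))
            = (t.drop (c * rn)).take rn := by
          rw [show ((c : Int) * (rn : Int)) = ((c * rn : Nat) : Int) by push_cast; ring,
            show (((c : Int) + 1) * (rn : Int)) = (((c + 1) * rn : Nat) : Int) by push_cast; ring,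
            PySem.List.slice_natCast]
          congr 1
          have hsm : (c + 1) * rn = c * rn + rn := Nat.succ_mul c rn
          omega
        by_cases hch : c < h.length
        · rw [if_pos (by simp [PySem.Chars.len]; exact_mod_cast hch), dif_pos hch, hs]
          have : PySem.List.pyGetD h (c : Int) ' ' = h[c] := by
            rw [PySem.List.pyGetD_natCast]
            simp [List.getD_eq_getElem?_getD, List.getElem?_eq_getElem hch]
          simp [this]
        · rw [if_neg (by simp [PySem.Chars.len]; omega), dif_neg hch, hs]
          simp
      rw [hb]
      rw [show ((c : Int) + 1) = (((c + 1 : Nat)) : Int) by push_cast; ring]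
      rw [ih (c + 1) _ (by omega)]
      rw [join_nil_eq_flatten, join_nil_eq_flatten]
      by_cases hch : c < h.length
      · simp [bsuf, hch]
      · simp [bsuf, hch]

-- ===== VERDICT (by name: the statement is the Claim_ definition above) =====
theorem interleave_hash_spec : Claim_equal_interleave_hash := by
  intro text hash_val key _
  unfold Spec_interleave_hash interleave_hash interleave_hash_alt
  set t := text.toList with ht
  set h := hash_val.toList with hh
  set rn : Nat := key.toList.length % 3 + 2 with hrn
  have hr : (PySem.Int.mod (PySem.Str.len key) 3 + 2) = (rn : Int) := by
    rw [PySem.Str.len_eq]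
    rw [show (3 : Int) = ((3 : Nat) : Int) by rfl]
    rw [PySem.Int.mod_natCast]
    omega
  have hlen : PySem.Str.len text = ((t.length : Nat) : Int) := by
    rw [PySem.Str.len_eq]
  have hnb : PySem.Int.floordiv ((t.length : Nat) : Int) (rn : Int) = ((t.length / rn : Nat) : Int) := by
    exact_mod_cast PySem.Int.floordiv_natCast t.length rn
  simp only [hr, hlen, hnb]
  have hA := aLoop t h rn (by omega) (t.length / rn) 0 [] (by omega)
  have hB := bLoop t h rn (t.length / rn) 0 [] (by omega)
  simp only [Nat.zero_mul, Nat.cast_zero, Nat.zero_min] at hA hB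
  rw [hA, hB]
  rw [join_nil_eq_flatten]
  simp
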